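-- pv_equiv track=rewrite | github.com/rossi-jeff/python-games-fastapi | utilities/ten_grand.py | UsedFiveKind
-- ===== SOURCE A (Python) =====
-- from typing import List
--
-- def MapDieFaces(dice: List[int]):
--     dieMap = {}
--     for d in dice:
--         if not d in dieMap:
--             dieMap[d] = 0
--         dieMap[d] = dieMap[d] + 1
--     keys: List[int] = []
--     for k in dieMap.keys():
--         keys.append(k)
--     values: List[int] = []
--     for v in dieMap.values():
--         values.append(v)
--     return dieMap, keys, values
--
-- def UsedFiveKind(dice: List[int]):
--     used: List[int] = []
--     dieMap, keys, _ = MapDieFaces(dice)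
--     for k in keys:
--         if dieMap[k] == 5:
--             for idx in range(dieMap[k]):
--                 used.append(k)
--     return used
-- ===== SOURCE B (Python) =====
-- from typing import List
--
-- def UsedFiveKind(dice: List[int]):
--     used: List[int] = []
--     pending = dice
--     while pending:
--         face = pending[0]
--         remaining = [d for d in pending if d != face]
--         if len(pending) - len(remaining) == 5:
--             used += [face] * 5
--         pending = remaining
--     return used
-- ===== Notes on version B (the rewrite author's own statement) =====
-- stated objective: alternative
-- what changed: Replaces A's build-a-counting-dict-then-iterate-keys strategy by a shrinking-worklist partition loop: repeatedly take the first pending face, split all its occurrences out of the worklist in one filter pass, and use the length drop as the face's count; no dict or count map is ever built.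
import Mathlib
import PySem

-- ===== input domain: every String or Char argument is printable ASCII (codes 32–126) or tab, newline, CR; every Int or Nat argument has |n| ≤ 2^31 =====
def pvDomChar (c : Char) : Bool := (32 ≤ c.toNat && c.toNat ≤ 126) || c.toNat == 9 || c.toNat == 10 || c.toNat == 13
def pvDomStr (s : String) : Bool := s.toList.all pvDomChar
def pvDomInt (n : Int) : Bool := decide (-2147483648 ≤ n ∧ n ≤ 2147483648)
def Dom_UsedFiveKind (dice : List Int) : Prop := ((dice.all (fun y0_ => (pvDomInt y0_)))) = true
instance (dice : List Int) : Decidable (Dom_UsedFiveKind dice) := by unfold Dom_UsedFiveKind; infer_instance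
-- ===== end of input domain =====

-- B drops A's counting dict and key/value copy loops: a shrinking-worklist loop takes the
-- first pending face, filters out all its occurrences in one pass, and reads the face's
-- count off the length drop (alternative decomposition, same result).

-- ===== PORT A =====
-- helper MapDieFaces, transliterated
def MapDieFaces (dice : List Int) : PySem.Dict Int Int × List Int × List Int :=
  let dieMap := dice.foldl (fun dm d =>
    let dm := if dm.contains d then dm else dm.insert d 0
    dm.insert d (dm.getD d 0 + 1)) PySem.Dict.empty
  let keys := dieMap.keys.foldl (fun ks k => ks ++ [k]) []
  let values := dieMap.values.foldl (fun vs v => vs ++ [v]) []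
  (dieMap, keys, values)

def UsedFiveKind (dice : List Int) : List Int :=
  let r := MapDieFaces dice
  let dieMap := r.1
  let keys := r.2.1
  keys.foldl (fun used k =>
    if dieMap.getD k 0 = 5 then
      (PySem.List.pyRange 0 (dieMap.getD k 0) 1).foldl (fun u _ => u ++ [k]) used
    else used) []

-- ===== PORT B =====
-- the while-loop of Source B: 'used' accumulator, shrinking 'pending' worklist
def usedFiveAux (used : List Int) (pending : List Int) : List Int :=
  match pending with
  | [] => used
  | face :: rest =>
    let remaining := (face :: rest).filter (fun d => d != face)
    let used' := if (face :: rest).length - remaining.length = 5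
                 then used ++ List.replicate 5 face else used
    usedFiveAux used' remaining
termination_by pending.length
decreasing_by
  simp only [List.filter, bne_self_eq_false, List.length_cons]
  exact Nat.lt_succ_of_le (List.length_filter_le _ _)

def UsedFiveKind_alt (dice : List Int) : List Int := usedFiveAux [] dice

-- ===== PRECONDITION & SPEC =====
def Spec_UsedFiveKind (dice : List Int) (out : List Int) : Prop := out = UsedFiveKind_alt dice
instance (dice : List Int) (out : List Int) : Decidable (Spec_UsedFiveKind dice out) := by unfold Spec_UsedFiveKind; infer_instance

-- ===== CLAIM (what is proved, stated in full; the proofs are below) =====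
def Claim_equal_UsedFiveKind : Prop := ∀ (dice : List Int), Dom_UsedFiveKind dice → Spec_UsedFiveKind dice (UsedFiveKind dice)

-- ===== LEMMAS AND PROOFS =====

-- common normal form: faces with count 5, first-appearance order, five copies each
def specUFK (dice : List Int) : List Int :=
  (PySem.List.dedup dice).flatMap (fun k => if dice.count k = 5 then List.replicate 5 k else [])

-- overwriting a key twice in a row keeps only the last value
theorem insert_insert_self (d : PySem.Dict Int Int) (k : Int) (v w : Int) :
    (d.insert k v).insert k w = d.insert k w := by
  apply PySem.Dict.ext
  by_cases h : d.contains k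
  · rw [PySem.Dict.items_insert_of_contains _ w ((PySem.Dict.contains_insert_self d k v)),
        PySem.Dict.items_insert_of_contains _ v h,
        PySem.Dict.items_insert_of_contains _ w h, List.map_map]
    apply List.map_congr_left
    intro p _
    by_cases hp : p.1 = k <;> simp [hp]
  · rw [PySem.Dict.items_insert_of_contains _ w ((PySem.Dict.contains_insert_self d k v)),
        PySem.Dict.items_insert_of_not_contains _ v (by simpa using h),
        PySem.Dict.items_insert_of_not_contains _ w (by simpa using h), List.map_append]
    have hmem : ∀ p ∈ d.items, p.1 ≠ k := by
      intro p hp hne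
      apply h
      rw [PySem.Dict.contains_iff_mem_keys]
      rw [← hne]
      exact List.mem_map_of_mem hp
    have hid : d.items.map (fun p => if (p.1 == k) = true then (k, w) else p) = List.map id d.items := by
      apply List.map_congr_left
      intro p hp
      simp [hmem p hp]
    rw [hid, List.map_id]
    simp

theorem getD_of_not_contains (d : PySem.Dict Int Int) (k : Int) (d0 : Int)
    (h : d.contains k = false) : d.getD k d0 = d0 := by
  have hn := (PySem.Dict.get?_eq_none_iff_contains d k).mpr h
  have : d.getD k d0 = (d.get? k).getD d0 := rfl
  rw [this, hn]
  rfl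

-- A's dict-building loop is Counter(dice)
theorem dm_eq_counter (dice : List Int) :
    dice.foldl (fun dm d =>
      let dm := if dm.contains d then dm else dm.insert d 0
      dm.insert d (dm.getD d 0 + 1)) PySem.Dict.empty = PySem.Dict.counter dice := by
  rw [← PySem.Dict.foldl_insert_getD_add_one_eq_counter]
  congr 1
  funext dm d
  by_cases h : dm.contains d
  · simp [h]
  · simp only [h, if_false, Bool.false_eq_true]
    rw [PySem.Dict.getD_insert_self, insert_insert_self,
        getD_of_not_contains dm d 0 (by simpa using h)]

theorem foldl_app_const (k : Int) (l : List Int) : ∀ u : List Int,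
    l.foldl (fun u _ => u ++ [k]) u = u ++ List.replicate l.length k := by
  induction l with
  | nil => simp
  | cons x xs ih =>
    intro u
    rw [List.foldl_cons, ih, List.length_cons, List.replicate_succ, List.append_assoc]
    simp

-- A computes specUFK
theorem A_eq_spec (dice : List Int) : UsedFiveKind dice = specUFK dice := by
  unfold UsedFiveKind MapDieFaces specUFK
  simp only [dm_eq_counter, PySem.Dict.keys_counter, PySem.List.foldl_append_singleton_eq_self,
    List.nil_append, ← PySem.List.dedup_eq_ofList, PySem.Dict.getD_counter]
  have hbody : (fun (used : List Int) (k : Int) =>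
      if (dice.count k : Int) = 5 then
        (PySem.List.pyRange 0 (dice.count k : Int) 1).foldl (fun u _ => u ++ [k]) used
      else used)
      = fun used k => used ++ (if dice.count k = 5 then List.replicate 5 k else []) := by
    funext used k
    by_cases h : dice.count k = 5
    · have h' : (dice.count k : Int) = 5 := by exact_mod_cast h
      simp only [h, h', if_true]
      rw [foldl_app_const, PySem.List.length_pyRange_one]
      simp [h']
    · have h' : ¬ ((dice.count k : Int) = 5) := by exact_mod_cast h
      simp [h, h']
  rw [hbody, PySem.List.foldl_append_eq_flatMap, List.nil_append]

-- filtering out an element already in the accumulating set does not change Set.ofList's fold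
theorem foldl_add_filter (a : Int) : ∀ (l : List Int) (s : PySem.Set Int), a ∈ s →
    (l.filter (fun d => d != a)).foldl PySem.Set.add s = l.foldl PySem.Set.add s := by
  intro l
  induction l with
  | nil => intro s _; rfl
  | cons x xs ih =>
    intro s hs
    by_cases hx : x = a
    · subst hx
      have : PySem.Set.add s x = s := by
        simp [PySem.Set.add, PySem.Set.contains, List.elem_eq_contains, List.contains_iff_mem, hs]
      simp only [List.filter_cons, bne_self_eq_false, List.foldl_cons, this]
      exact ih s hs
    · have hb : (x != a) = true := by simp [hx]
      simp only [List.filter_cons, hb, if_true, List.foldl_cons]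
      apply ih
      unfold PySem.Set.add
      split_ifs
      · exact hs
      · exact List.mem_append_left _ hs
  
-- a head element absent from the rest of the fold stays in front
theorem foldl_add_cons (a : Int) : ∀ (l : List Int) (s : PySem.Set Int), a ∉ l →
    l.foldl PySem.Set.add (a :: s) = a :: l.foldl PySem.Set.add s := by
  intro l
  induction l with
  | nil => intro s _; rfl
  | cons x xs ih =>
    intro s hnl
    have hxa : x ≠ a := fun h => hnl (h ▸ List.mem_cons_self)
    simp only [List.foldl_cons]
    by_cases hm : x ∈ s
    · rw [show PySem.Set.add (a :: s) x = a :: s by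
            simp [PySem.Set.add, PySem.Set.contains, hxa, hm],
          show PySem.Set.add s x = s by simp [PySem.Set.add, PySem.Set.contains, hm]]
      exact ih s (fun h => hnl (List.mem_cons_of_mem _ h))
    · rw [show PySem.Set.add (a :: s) x = a :: (s ++ [x]) by
            simp [PySem.Set.add, PySem.Set.contains, hxa, hm],
          show PySem.Set.add s x = s ++ [x] by simp [PySem.Set.add, PySem.Set.contains, hm]]
      exact ih _ (fun h => hnl (List.mem_cons_of_mem _ h))

-- first-appearance dedup recursion: head, then dedup of the rest with the head removed
theorem dedup_cons_filter (a : Int) (l : List Int) :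
    PySem.List.dedup (a :: l) = a :: PySem.List.dedup (l.filter (fun d => d != a)) := by
  rw [PySem.List.dedup_eq_ofList, PySem.List.dedup_eq_ofList,
      PySem.Set.ofList_eq_foldl, PySem.Set.ofList_eq_foldl]
  have h1 : (a :: l).foldl PySem.Set.add [] = l.foldl PySem.Set.add [a] := by
    simp [PySem.Set.add, PySem.Set.contains]
  rw [h1, ← foldl_add_filter a l [a] List.mem_cons_self,
      foldl_add_cons a _ _ (by simp)]

theorem length_filter_ne (a : Int) (l : List Int) :
    (l.filter (fun d => d != a)).length + l.count a = l.length := by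
  induction l with
  | nil => simp
  | cons x xs ih =>
    by_cases hx : x = a
    · subst hx; simp [List.filter_cons, ih.symm]; omega
    · simp only [List.filter_cons, List.count_cons]
      have hb : (x != a) = true := by simp [hx]
      simp [hb, hx, List.length_cons]
      omega

theorem count_filter_ne (a k : Int) (l : List Int) (h : k ≠ a) :
    (l.filter (fun d => d != a)).count k = l.count k :=
  List.count_filter (by simp [h])

-- B computes specUFK
theorem aux_eq_spec : ∀ (n : ℕ) (pending used : List Int), pending.length ≤ n →
    usedFiveAux used pending = used ++ specUFK pending := by
  intro n
  induction n with
  | zero =>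
    intro pending used h
    have : pending = [] := List.eq_nil_of_length_eq_zero (Nat.le_zero.mp h)
    subst this
    simp [usedFiveAux, specUFK, PySem.List.dedup]
  | succ m ih =>
    intro pending used h
    match pending with
    | [] => simp [usedFiveAux, specUFK, PySem.List.dedup]
    | face :: rest =>
      rw [usedFiveAux]
      simp only [List.filter_cons, bne_self_eq_false, if_neg Bool.false_ne_true]
      have hlen : (rest.filter (fun d => d != face)).length ≤ m := by
        have := List.length_filter_le (fun d => d != face) rest
        simp only [List.length_cons] at h
        omega
      rw [ih _ _ hlen]
      have hc : (face :: rest).length - (rest.filter (fun d => d != face)).length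
          = (face :: rest).count face := by
        have := length_filter_ne face rest
        simp only [List.length_cons, List.count_cons]
        simp only [beq_self_eq_true, if_true]
        omega
      have hspec : specUFK (face :: rest)
          = (if (face :: rest).count face = 5 then List.replicate 5 face else [])
            ++ specUFK (rest.filter (fun d => d != face)) := by
        unfold specUFK
        rw [dedup_cons_filter, List.flatMap_cons]
        congr 1
        apply List.flatMap_congr
        intro k hk
        have hkne : k ≠ face := by
          have : k ∈ rest.filter (fun d => d != face) := by
            rw [← PySem.List.mem_dedup]; exact hk
          have := List.of_mem_filter this
          simpa using this
        rw [show (face :: rest).count k = (rest.filter (fun d => d != face)).count k by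
              rw [count_filter_ne face k rest hkne]
              simp [Ne.symm hkne]]
      rw [hspec, hc]
      by_cases h5 : (face :: rest).count face = 5
      · rw [if_pos h5, if_pos h5, List.append_assoc]
      · rw [if_neg h5, if_neg h5, List.nil_append]

theorem B_eq_spec (dice : List Int) : UsedFiveKind_alt dice = specUFK dice := by
  unfold UsedFiveKind_alt
  simpa using aux_eq_spec dice.length dice [] (le_refl _)

-- ===== VERDICT (by name: the statement is the Claim_ definition above) =====
theorem UsedFiveKind_spec : Claim_equal_UsedFiveKind := by
  intro dice _
  unfold Spec_UsedFiveKind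
  rw [A_eq_spec, B_eq_spec]
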